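-- pv_equiv track=rewrite | github.com/pairlab/ActAIM | affordance/envs/franka_affordance.py | compute_max_mode
-- ===== SOURCE A (Python) =====
-- def compute_max_mode(mode_str):
--     total_mode = 0
--     for i in range(len(mode_str)):
--         index = mode_str[i]
--         if index == '0' or index == '2':
--             total_mode += 1
--         else:
--             total_mode += 2
--     return total_mode
-- ===== SOURCE B (Python) =====
-- def compute_max_mode(mode_str):
--     # closed form: every char contributes 2, except '0' and '2' which contribute 1
--     return 2 * len(mode_str) - mode_str.count('0') - mode_str.count('2')
-- ===== Notes on version B (the rewrite author's own statement) =====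
-- stated objective: simpler
-- what changed: Replaces the per-character branching accumulation loop with a closed-form arithmetic expression: total = 2*len minus the counts of the two 1-weight characters obtained by str.count.
import Mathlib
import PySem

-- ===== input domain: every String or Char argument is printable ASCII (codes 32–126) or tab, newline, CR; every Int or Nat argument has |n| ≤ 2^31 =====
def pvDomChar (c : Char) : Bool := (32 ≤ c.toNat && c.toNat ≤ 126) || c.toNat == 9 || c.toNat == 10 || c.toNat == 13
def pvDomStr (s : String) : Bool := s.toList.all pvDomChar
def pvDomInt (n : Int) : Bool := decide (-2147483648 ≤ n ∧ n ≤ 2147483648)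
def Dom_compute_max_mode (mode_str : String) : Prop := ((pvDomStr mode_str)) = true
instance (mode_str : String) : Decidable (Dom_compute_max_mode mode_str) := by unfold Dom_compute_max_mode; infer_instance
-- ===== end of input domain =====

-- B replaces A's per-character branching loop by the closed form 2*len - count('0') - count('2') (simpler).

-- ===== PORT A =====
-- for i in range(len(mode_str)): index = mode_str[i]; branch; accumulate
def compute_max_mode (mode_str : String) : Int :=
  (PySem.List.pyRange 0 (mode_str.toList.length : Int) 1).foldl
    (fun total_mode i =>
      let index := PySem.List.pyGetD mode_str.toList i ' '   -- index always in range here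
      if index = '0' ∨ index = '2' then total_mode + 1 else total_mode + 2)
    0

-- ===== PORT B =====
def compute_max_mode_alt (mode_str : String) : Int :=
  2 * (PySem.Str.len mode_str : Int)
    - (PySem.Str.count mode_str "0" : Int)
    - (PySem.Str.count mode_str "2" : Int)

-- ===== PRECONDITION & SPEC =====
def Spec_compute_max_mode (mode_str : String) (out : Int) : Prop := out = compute_max_mode_alt mode_str
instance (mode_str : String) (out : Int) : Decidable (Spec_compute_max_mode mode_str out) := by unfold Spec_compute_max_mode; infer_instance

-- ===== CLAIM (what is proved, stated in full; the proofs are below) =====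
def Claim_equal_compute_max_mode : Prop := ∀ (mode_str : String), Dom_compute_max_mode mode_str → Spec_compute_max_mode mode_str (compute_max_mode mode_str)

-- ===== LEMMAS AND PROOFS =====

-- single-character substring count is List.count
theorem chars_count_go_single (c : Char) (l : List Char) (acc : Nat) :
    PySem.Chars.count.go [c] l.length l acc = acc + l.count c := by
  induction l generalizing acc with
  | nil => simp [PySem.Chars.count.go]
  | cons h t ih =>
      simp only [List.length_cons, PySem.Chars.count.go, List.isPrefixOf]
      by_cases hc : h = c
      · simp [hc, ih]; omega
      · have : (c == h) = false := by simp; exact fun e => hc e.symm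
        simp [this, ih, hc]

theorem chars_count_single (c : Char) (l : List Char) :
    PySem.Chars.count l [c] = l.count c := by
  simp [PySem.Chars.count, chars_count_go_single]

theorem loop_closed_form (l : List Char) (acc : Int) :
    l.foldl (fun total_mode c =>
      if c = '0' ∨ c = '2' then total_mode + 1 else total_mode + 2) acc
    = acc + 2 * l.length - l.count '0' - l.count '2' := by
  induction l generalizing acc with
  | nil => simp
  | cons h t ih =>
      simp only [List.foldl_cons, ih, List.count_cons, List.length_cons]
      by_cases h0 : h = '0'
      · simp [h0]; ring
      · by_cases h2 : h = '2'
        · simp [h2]; ring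
        · have e0 : ('0' == h) = false := by simp; exact fun e => h0 e.symm
          have e2 : ('2' == h) = false := by simp; exact fun e => h2 e.symm
          simp [h0, h2]; ring

-- ===== VERDICT (by name: the statement is the Claim_ definition above) =====
theorem compute_max_mode_spec : Claim_equal_compute_max_mode := by
  intro s _
  unfold Spec_compute_max_mode compute_max_mode compute_max_mode_alt
  have h := PySem.List.foldl_pyRange_pyGetD (xs := s.toList) (d := ' ')
    (f := fun total_mode c => if c = '0' ∨ c = '2' then total_mode + 1 else total_mode + 2)
    (init := (0 : Int)) (a := 0) (le_refl 0)
  calc (PySem.List.pyRange 0 (s.toList.length : Int) 1).foldl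
        (fun total_mode i =>
          let index := PySem.List.pyGetD s.toList i ' '
          if index = '0' ∨ index = '2' then total_mode + 1 else total_mode + 2) 0
      = (s.toList.drop (0 : Int).toNat).foldl
        (fun total_mode c => if c = '0' ∨ c = '2' then total_mode + 1 else total_mode + 2) 0 := h
    _ = 2 * (PySem.Str.len s : Int) - (PySem.Str.count s "0" : Int)
          - (PySem.Str.count s "2" : Int) := by
        simp only [Int.toNat_zero, List.drop_zero, loop_closed_form, PySem.Str.count_eq,
          PySem.Str.len_eq]
        have h0 : ("0" : String).toList = ['0'] := rfl
        have h2 : ("2" : String).toList = ['2'] := rfl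
        rw [h0, h2, chars_count_single, chars_count_single]

        ring
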